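-- pv_equiv track=rewrite | github.com/gakkistyle/comp9021 | practice_6/Practice_6_solutions/magic_squares.py | siamese_magic_square
-- ===== SOURCE A (Python) =====
-- from itertools import count
--
-- def siamese_magic_square(n):
--     '''
--     Given an odd positive integer n, returns a magic square of order n thanks to
--     the Siamese method, that starts with 1 put at the centre of the first row,
--     and having placed number k < n^2, places number k+1 by moving diagonally up and right
--     by one cell, wrapping around when needed (as if a torus was made out of the square),
--     unless that cell is already occupied, in which case k+1 is placed below the cell
--     where k is (with no need to wrap around).
--
--     For instance, for n = 7, one obtains:
--     30 39 48  1 10 19 28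
--     38 47  7  9 18 27 29
--     46  6  8 17 26 35 37
--      5 14 16 25 34 36 45
--     13 15 24 33 42 44  4
--     21 23 32 41 43  3 12
--     22 31 40 49  2 11 20
--     '''
--     if n % 2 == 0:
--         return
--     square = [[None] * n for _ in range(n)]
--     k = count(1)
--     i, j = 0, n // 2
--     square[i][j] = next(k)
--     for _ in range(n ** 2 - 1):
--         i1, j1 = (i - 1) % n, (j + 1) % n
--         i, j = (i + 1, j) if square[i1][j1] else (i1, j1)
--         square[i][j] = next(k)
--     return square
-- ===== SOURCE B (Python) =====
-- def siamese_magic_square(n):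
--     if n % 2 == 0:
--         return
--     c = n // 2
--     return [[((i + j - c) % n) * n + (2 * ((i + j - c) % n) - i) % n + 1
--              for j in range(n)]
--             for i in range(n)]
-- ===== Notes on version B (the rewrite author's own statement) =====
-- stated objective: simpler
-- what changed: B replaces A's stateful cursor simulation (n^2-1 moves with occupancy tests on a mutable grid) by the Siamese closed form that computes every cell independently: a direct modular formula in the cell's row and column indices.
import Mathlib
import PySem

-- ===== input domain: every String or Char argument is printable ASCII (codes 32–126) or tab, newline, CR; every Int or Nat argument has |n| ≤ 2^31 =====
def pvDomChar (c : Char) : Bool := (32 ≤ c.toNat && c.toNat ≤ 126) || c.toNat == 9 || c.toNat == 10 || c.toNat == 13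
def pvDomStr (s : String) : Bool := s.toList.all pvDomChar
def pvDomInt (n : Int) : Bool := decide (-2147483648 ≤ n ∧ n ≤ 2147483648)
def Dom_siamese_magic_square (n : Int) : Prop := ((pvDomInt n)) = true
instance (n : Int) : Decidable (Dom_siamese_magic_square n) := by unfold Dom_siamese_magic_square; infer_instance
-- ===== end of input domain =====

-- B replaces A's cursor simulation by the Siamese closed form, computing each cell
-- independently from its row and column indices (objective: simpler).

-- ===== PORT A =====
-- A's square holds Python None in empty cells; placed values are the positive ints 1..n²,
-- so we encode None as 0 and the truthiness test `if square[i1][j1]` as `≠ 0` (exact here).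
def pvCellGet (sq : List (List Int)) (i j : Int) : Int :=
  PySem.List.pyGetD (PySem.List.pyGetD sq i []) j 0

def pvCellSet (sq : List (List Int)) (i j v : Int) : List (List Int) :=
  PySem.List.pySetD sq i (PySem.List.pySetD (PySem.List.pyGetD sq i []) j v)

-- the body of A's `for _ in range(n ** 2 - 1)` loop; state = (square, i, j, next value of the counter k)
def pvStep (n : Int) (st : List (List Int) × Int × Int × Int) : List (List Int) × Int × Int × Int :=
  let i1 := PySem.Int.mod (st.2.1 - 1) n
  let j1 := PySem.Int.mod (st.2.2.1 + 1) n
  let ij := if pvCellGet st.1 i1 j1 ≠ 0 then (st.2.1 + 1, st.2.2.1) else (i1, j1)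
  (pvCellSet st.1 ij.1 ij.2 st.2.2.2, ij.1, ij.2, st.2.2.2 + 1)

def siamese_magic_square (n : Int) : Option (List (List Int)) :=
  if PySem.Int.mod n 2 = 0 then none
  else
    let sq0 : List (List Int) := List.replicate n.toNat (List.replicate n.toNat 0)
    let sq1 := pvCellSet sq0 0 (PySem.Int.floordiv n 2) 1
    let st := (PySem.List.pyRange 0 (n ^ 2 - 1) 1).foldl (fun st _ => pvStep n st)
                (sq1, 0, PySem.Int.floordiv n 2, 2)
    some st.1

-- ===== PORT B =====
def siamese_magic_square_alt (n : Int) : Option (List (List Int)) :=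
  if PySem.Int.mod n 2 = 0 then none
  else
    let c := PySem.Int.floordiv n 2
    some ((PySem.List.pyRange 0 n 1).map (fun i =>
      (PySem.List.pyRange 0 n 1).map (fun j =>
        PySem.Int.mod (i + j - c) n * n
          + PySem.Int.mod (2 * PySem.Int.mod (i + j - c) n - i) n + 1)))

-- ===== PRECONDITION & SPEC =====
-- Pre_ excludes odd negative n, on which Python A raises IndexError (the grid comprehension is empty, so the initial placement fails).
def Pre_siamese_magic_square (n : Int) : Prop := PySem.Int.mod n 2 = 0 ∨ 0 < n
instance (n : Int) : Decidable (Pre_siamese_magic_square n) := by unfold Pre_siamese_magic_square; infer_instance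
def pvWitness_siamese_magic_square : Int := 5

def Spec_siamese_magic_square (n : Int) (out : Option (List (List Int))) : Prop := out = siamese_magic_square_alt n
instance (n : Int) (out : Option (List (List Int))) : Decidable (Spec_siamese_magic_square n out) := by unfold Spec_siamese_magic_square; infer_instance

-- ===== CLAIM (what is proved, stated in full; the proofs are below) =====
def Claim_equal_siamese_magic_square : Prop := ∀ (n : Int), Dom_siamese_magic_square n → Pre_siamese_magic_square n → Spec_siamese_magic_square n (siamese_magic_square n)

-- ===== LEMMAS AND PROOFS =====

-- the closed form: value of cell (i, j)
def pvVal (n i j : Int) : Int :=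
  (i + j - n / 2) % n * n + (2 * ((i + j - n / 2) % n) - i) % n + 1

-- position of value v in the Siamese walk (q = block, r = offset inside the block)
def pvI (n v : Int) : Int := (2 * ((v - 1) / n) - (v - 1) % n) % n
def pvJ (n v : Int) : Int := (n / 2 + (v - 1) % n - (v - 1) / n) % n

-- the square after values 1..t have been placed (0 = still empty)
def pvGrid (n t : Int) : List (List Int) :=
  (List.range n.toNat).map (fun (a : Nat) =>
    (List.range n.toNat).map (fun (b : Nat) =>
      if pvVal n (a : Int) (b : Int) ≤ t then pvVal n (a : Int) (b : Int) else 0))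

theorem pv_emodu {n x r : Int} (h0 : 0 ≤ r) (h1 : r < n) (k : Int) (hx : x = n * k + r) : x % n = r := by
  subst hx
  rw [show n * k + r = r + n * k by ring, Int.add_mul_emod_self_left]
  exact Int.emod_eq_of_lt h0 h1

theorem pvVal_bounds {n : Int} (hn : 0 < n) (i j : Int) :
    1 ≤ pvVal n i j ∧ pvVal n i j ≤ n ^ 2 := by
  unfold pvVal
  have hg0 := Int.emod_nonneg (i + j - n / 2) (ne_of_gt hn)
  have hg1 := Int.emod_lt_of_pos (i + j - n / 2) hn
  have hs0 := Int.emod_nonneg (2 * ((i + j - n / 2) % n) - i) (ne_of_gt hn)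
  have hs1 := Int.emod_lt_of_pos (2 * ((i + j - n / 2) % n) - i) hn
  constructor
  · nlinarith
  · nlinarith

theorem pv_qr {n v : Int} (hn : 0 < n) (hv1 : 1 ≤ v) (hv2 : v ≤ n ^ 2) :
    0 ≤ (v - 1) / n ∧ (v - 1) / n < n ∧ 0 ≤ (v - 1) % n ∧ (v - 1) % n < n ∧
      v = n * ((v - 1) / n) + (v - 1) % n + 1 := by
  have h := Int.mul_ediv_add_emod (v - 1) n
  have hr0 := Int.emod_nonneg (v - 1) (ne_of_gt hn)
  have hr1 := Int.emod_lt_of_pos (v - 1) hn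
  have hq0 : 0 ≤ (v - 1) / n := Int.ediv_nonneg (by omega) hn.le
  refine ⟨hq0, ?_, hr0, hr1, by linarith⟩
  by_contra hq
  push Not at hq
  have : n * n ≤ n * ((v - 1) / n) := by nlinarith
  have hv : v ≤ n ^ 2 := hv2
  nlinarith

theorem pv_pos_spec {n v : Int} (hn : 0 < n) (hv1 : 1 ≤ v) (hv2 : v ≤ n ^ 2) :
    0 ≤ pvI n v ∧ pvI n v < n ∧ 0 ≤ pvJ n v ∧ pvJ n v < n ∧ pvVal n (pvI n v) (pvJ n v) = v := by
  obtain ⟨hq0, hq1, hr0, hr1, hveq⟩ := pv_qr hn hv1 hv2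
  set q := (v - 1) / n with hq
  set r := (v - 1) % n with hr
  have hi0 : 0 ≤ pvI n v := Int.emod_nonneg _ (ne_of_gt hn)
  have hi1 : pvI n v < n := Int.emod_lt_of_pos _ hn
  have hj0 : 0 ≤ pvJ n v := Int.emod_nonneg _ (ne_of_gt hn)
  have hj1 : pvJ n v < n := Int.emod_lt_of_pos _ hn
  have hiRep : pvI n v = 2 * q - r - n * ((2 * q - r) / n) := by
    rw [pvI, ← hq, ← hr, Int.emod_def]
  have hjRep : pvJ n v = n / 2 + r - q - n * ((n / 2 + r - q) / n) := by
    rw [pvJ, ← hq, ← hr, Int.emod_def]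
  have hg : (pvI n v + pvJ n v - n / 2) % n = q := by
    refine pv_emodu hq0 hq1 (-((2 * q - r) / n + (n / 2 + r - q) / n)) ?_
    rw [hiRep, hjRep]; ring
  have hs : (2 * q - pvI n v) % n = r := by
    refine pv_emodu hr0 hr1 ((2 * q - r) / n) ?_
    rw [hiRep]; ring
  refine ⟨hi0, hi1, hj0, hj1, ?_⟩
  unfold pvVal
  rw [hg, hs]
  linarith

theorem pv_inj {n a b : Int} (hn : 0 < n) (ha : 0 ≤ a) (ha2 : a < n) (hb : 0 ≤ b) (hb2 : b < n) :
    pvI n (pvVal n a b) = a ∧ pvJ n (pvVal n a b) = b := by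
  set c := n / 2 with hc
  set g := (a + b - c) % n with hgdef
  set s := (2 * g - a) % n with hsdef
  have hg0 : 0 ≤ g := Int.emod_nonneg _ (ne_of_gt hn)
  have hg1 : g < n := Int.emod_lt_of_pos _ hn
  have hs0 : 0 ≤ s := Int.emod_nonneg _ (ne_of_gt hn)
  have hs1 : s < n := Int.emod_lt_of_pos _ hn
  have hval : pvVal n a b = g * n + s + 1 := by rw [pvVal, ← hc, ← hgdef, ← hsdef]
  have hq : (pvVal n a b - 1) / n = g := by
    rw [hval, show g * n + s + 1 - 1 = s + n * g by ring,
      Int.add_mul_ediv_left s g (ne_of_gt hn), Int.ediv_eq_zero_of_lt hs0 hs1, zero_add]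
  have hrr : (pvVal n a b - 1) % n = s := by
    rw [hval]
    exact pv_emodu hs0 hs1 g (by ring)
  have hsRep : s = 2 * g - a - n * ((2 * g - a) / n) := by rw [hsdef, Int.emod_def]
  have hgRep : g = a + b - c - n * ((a + b - c) / n) := by rw [hgdef, Int.emod_def]
  constructor
  · rw [pvI, hq, hrr]
    refine pv_emodu ha ha2 ((2 * g - a) / n) ?_
    rw [hsRep]; ring
  · rw [pvJ, hq, hrr, ← hc]
    refine pv_emodu hb hb2 (-((2 * g - a) / n + (a + b - c) / n)) ?_
    rw [hsRep, hgRep]; ring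

theorem pv_grid_get {n a b : Int} (ha : 0 ≤ a) (ha2 : a < n) (hb : 0 ≤ b) (hb2 : b < n) (t : Int) :
    pvCellGet (pvGrid n t) a b = if pvVal n a b ≤ t then pvVal n a b else 0 := by
  have haN : ((a.toNat : Nat) : Int) = a := Int.toNat_of_nonneg ha
  have hbN : ((b.toNat : Nat) : Int) = b := Int.toNat_of_nonneg hb
  rw [pvCellGet, pvGrid]
  rw [PySem.List.pyGetD_eq_getElem _ _ ha (by simp; omega)]
  rw [List.getElem_map, List.getElem_range]
  rw [PySem.List.pyGetD_eq_getElem _ _ hb (by simp; omega)]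
  rw [List.getElem_map, List.getElem_range, haN, hbN]

theorem pv_grid_set {n v : Int} (hn : 0 < n) (hv1 : 1 ≤ v) (hv2 : v ≤ n ^ 2) :
    pvCellSet (pvGrid n (v - 1)) (pvI n v) (pvJ n v) v = pvGrid n v := by
  obtain ⟨hi0, hi1, hj0, hj1, hval⟩ := pv_pos_spec hn hv1 hv2
  have hkey : ∀ (a b : Nat), a < n.toNat → b < n.toNat →
      ¬(a = (pvI n v).toNat ∧ b = (pvJ n v).toNat) → pvVal n a b ≠ v := by
    intro a b ha hb hne he
    obtain ⟨h1, h2⟩ := pv_inj hn (by omega : (0:Int) ≤ (a : Int)) (by omega)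
      (by omega : (0:Int) ≤ (b : Int)) (by omega)
    rw [he] at h1 h2
    exact hne ⟨by omega, by omega⟩
  have hgl : ∀ t : Int, (pvGrid n t).length = n.toNat := fun t => by simp [pvGrid]
  have hrow : ∀ (t : Int) (a : Nat) (ha : a < (pvGrid n t).length),
      (pvGrid n t)[a] = (List.range n.toNat).map
        (fun (b : Nat) => if pvVal n (a : Int) (b : Int) ≤ t then pvVal n (a : Int) (b : Int) else 0) := by
    intro t a ha
    simp [pvGrid]
  unfold pvCellSet
  rw [PySem.List.pySetD_of_nonneg _ _ hi0, PySem.List.pySetD_of_nonneg _ _ hj0,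
      PySem.List.pyGetD_eq_getElem _ _ hi0 (by rw [hgl]; omega)]
  apply List.ext_getElem
  · simp [List.length_set, hgl]
  · intro a h1 h2
    have haN : a < n.toNat := by rw [hgl] at h2; omega
    rw [List.getElem_set, hrow v a h2]
    by_cases hA : (pvI n v).toNat = a
    · rw [if_pos hA, hrow (v-1) (pvI n v).toNat (by rw [hgl]; omega)]
      apply List.ext_getElem
      · simp
      · intro b hb1 hb2
        have hbN : b < n.toNat := by simpa using hb2
        rw [List.getElem_set]
        by_cases hB : (pvJ n v).toNat = b
        · rw [if_pos hB, List.getElem_map, List.getElem_range]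
          have hab : pvVal n (a : Int) (j := (b : Int)) = v := by
            rw [← hA, ← hB, Int.toNat_of_nonneg hi0, Int.toNat_of_nonneg hj0]
            exact hval
          rw [hab, if_pos le_rfl]
        · rw [if_neg hB, List.getElem_map, List.getElem_range,
              List.getElem_map, List.getElem_range, ← hA, Int.toNat_of_nonneg hi0]
          have hne := hkey (pvI n v).toNat b (by omega) hbN (by tauto)
          rw [Int.toNat_of_nonneg hi0] at hne
          split_ifs <;> omega
    · rw [if_neg hA, hrow (v-1) a (by rw [hgl]; omega)]
      apply List.map_congr_left
      intro b hbmem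
      have hbN := List.mem_range.mp hbmem
      have hne := hkey a b haN hbN (by tauto)
      split_ifs <;> omega

theorem pv_step_eq {n v : Int} (hn : 0 < n) (hodd : n % 2 = 1) (hv1 : 1 ≤ v) (hv2 : v ≤ n ^ 2 - 1) :
    pvStep n (pvGrid n v, pvI n v, pvJ n v, v + 1) = (pvGrid n (v + 1), pvI n (v + 1), pvJ n (v + 1), v + 2) := by
  obtain ⟨hq0, hq1, hr0, hr1, hveq⟩ := pv_qr hn hv1 (by linarith)
  set q := (v - 1) / n with hqdef
  set r := (v - 1) % n with hrdef
  obtain ⟨hi0, hi1, hj0, hj1, -⟩ := pv_pos_spec hn hv1 (by linarith)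
  have hiRep : pvI n v = 2 * q - r - n * ((2 * q - r) / n) := by
    rw [pvI, ← hqdef, ← hrdef, Int.emod_def]
  have hjRep : pvJ n v = n / 2 + r - q - n * ((n / 2 + r - q) / n) := by
    rw [pvJ, ← hqdef, ← hrdef, Int.emod_def]
  set dA := (2 * q - r) / n with hdA
  set dD := (n / 2 + r - q) / n with hdD
  unfold pvStep
  simp only [PySem.Int.mod_eq_emod_of_pos hn]
  set i1 := (pvI n v - 1) % n with hi1def
  set j1 := (pvJ n v + 1) % n with hj1def
  have hi1b0 : 0 ≤ i1 := Int.emod_nonneg _ (ne_of_gt hn)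
  have hi1b1 : i1 < n := Int.emod_lt_of_pos _ hn
  have hj1b0 : 0 ≤ j1 := Int.emod_nonneg _ (ne_of_gt hn)
  have hj1b1 : j1 < n := Int.emod_lt_of_pos _ hn
  have hi1Rep : i1 = pvI n v - 1 - n * ((pvI n v - 1) / n) := by rw [hi1def, Int.emod_def]
  have hj1Rep : j1 = pvJ n v + 1 - n * ((pvJ n v + 1) / n) := by rw [hj1def, Int.emod_def]
  set dB := (pvI n v - 1) / n with hdB
  set dC := (pvJ n v + 1) / n with hdC
  have hg : (i1 + j1 - n / 2) % n = q :=
    pv_emodu hq0 hq1 (-(dA + dB + dD + dC)) (by rw [hi1Rep, hj1Rep, hiRep, hjRep]; ring)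
  by_cases hcase : r = n - 1
  · -- end of a block: the up-right cell holds n*q + 1, so A drops down
    have hs : (2 * q - i1) % n = 0 :=
      pv_emodu le_rfl hn (1 + dA + dB) (by rw [hi1Rep, hiRep, hcase]; ring)
    have hval1 : pvVal n i1 j1 = n * q + 1 := by rw [pvVal, hg, hs]; ring
    have hget : pvCellGet (pvGrid n v) i1 j1 = n * q + 1 := by
      rw [pv_grid_get hi1b0 hi1b1 hj1b0 hj1b1, hval1, if_pos (by linarith)]
    have hnq : 0 < n * q + 1 := by nlinarith
    have hqlt : q + 1 < n := by nlinarith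
    have hq' : (v + 1 - 1) / n = q + 1 := by
      rw [show v + 1 - 1 = 0 + n * (q + 1) by linarith,
        Int.add_mul_ediv_left _ _ (ne_of_gt hn), Int.zero_ediv, zero_add]
    have hr' : (v + 1 - 1) % n = 0 := pv_emodu le_rfl hn (q + 1) (by linarith)
    rw [hcase] at hiRep hjRep
    have hIne : pvI n v ≠ n - 1 := by
      intro he
      have h0 : 2 * q + 2 = 2 * n + n * dA := by linarith [hiRep, he]
      have he2 : n * (2 + dA) = 2 * n + n * dA := by ring
      have hlt : n * (2 + dA) < n * 2 := by linarith
      have h3 : 2 + dA < 2 := lt_of_mul_lt_mul_left hlt hn.le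
      have h4 : 0 < 2 + dA := by
        by_contra h5
        push Not at h5
        have := mul_nonpos_of_nonneg_of_nonpos hn.le h5
        linarith
      have hda : dA = -1 := by omega
      rw [hda] at h0
      omega
    have hI' : pvI n (v + 1) = pvI n v + 1 := by
      rw [pvI, hq', hr']
      exact pv_emodu (by omega) (by omega) (1 + dA) (by rw [hiRep]; ring)
    have hJ' : pvJ n (v + 1) = pvJ n v := by
      rw [pvJ, hq', hr']
      exact pv_emodu hj0 hj1 (dD - 1) (by rw [hjRep]; ring)
    have hgrid := pv_grid_set hn (v := v + 1) (by linarith) (by linarith)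
    rw [show v + 1 - 1 = v by ring, hI', hJ'] at hgrid
    have hne0 : n * q + 1 ≠ 0 := ne_of_gt hnq
    simp [hget, hne0, hgrid, hI', hJ']
    omega
  · -- inside a block: the up-right cell holds v + 1 > v, still empty
    have hs : (2 * q - i1) % n = r + 1 :=
      pv_emodu (by omega) (by omega) (dA + dB) (by rw [hi1Rep, hiRep]; ring)
    have hval1 : pvVal n i1 j1 = v + 1 := by rw [pvVal, hg, hs]; linarith
    have hget : pvCellGet (pvGrid n v) i1 j1 = 0 := by
      rw [pv_grid_get hi1b0 hi1b1 hj1b0 hj1b1, hval1, if_neg (by omega)]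
    have hq' : (v + 1 - 1) / n = q := by
      rw [show v + 1 - 1 = (r + 1) + n * q by linarith,
        Int.add_mul_ediv_left _ _ (ne_of_gt hn), Int.ediv_eq_zero_of_lt (by omega) (by omega), zero_add]
    have hr' : (v + 1 - 1) % n = r + 1 := pv_emodu (by omega) (by omega) q (by linarith)
    have hI' : pvI n (v + 1) = i1 := by
      rw [pvI, hq', hr']
      exact pv_emodu hi1b0 hi1b1 (dA + dB) (by rw [hi1Rep, hiRep]; ring)
    have hJ' : pvJ n (v + 1) = j1 := by
      rw [pvJ, hq', hr']
      exact pv_emodu hj1b0 hj1b1 (dD + dC) (by rw [hj1Rep, hjRep]; ring)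
    have hgrid := pv_grid_set hn (v := v + 1) (by linarith) (by linarith)
    rw [show v + 1 - 1 = v by ring, hI', hJ'] at hgrid
    simp [hget, hgrid, hI', hJ']
    omega

theorem pv_fold_inv {n : Int} (hn : 0 < n) (hodd : n % 2 = 1) (m : Nat) (hm : (m : Int) ≤ n ^ 2 - 1) :
    (List.range m).foldl (fun st _ => pvStep n st) (pvGrid n 1, pvI n 1, pvJ n 1, 2)
      = (pvGrid n ((m : Int) + 1), pvI n ((m : Int) + 1), pvJ n ((m : Int) + 1), (m : Int) + 2) := by
  induction m with
  | zero => norm_num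
  | succ m ih =>
    have hm' : (m : Int) ≤ n ^ 2 - 1 := by push_cast at hm ⊢; linarith
    rw [List.range_succ, List.foldl_append, ih hm']
    simp only [List.foldl_cons, List.foldl_nil]
    have hstep := pv_step_eq hn hodd (v := (m : Int) + 1) (by omega) (by push_cast at hm; linarith)
    push_cast
    rw [show (m : Int) + 2 = (m : Int) + 1 + 1 by ring, hstep]

theorem pv_grid_zero {n : Int} (hn : 0 < n) :
    pvGrid n 0 = List.replicate n.toNat (List.replicate n.toNat 0) := by
  apply List.eq_replicate_iff.mpr
  refine ⟨by simp [pvGrid], ?_⟩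
  intro row hrow
  simp only [pvGrid, List.mem_map] at hrow
  obtain ⟨a, -, rfl⟩ := hrow
  apply List.eq_replicate_iff.mpr
  refine ⟨by simp, ?_⟩
  intro x hx
  simp only [List.mem_map] at hx
  obtain ⟨b, -, rfl⟩ := hx
  have := (pvVal_bounds hn (a : Int) (b : Int)).1
  rw [if_neg (by omega)]

theorem pv_init {n : Int} (hn : 0 < n) :
    pvCellSet (List.replicate n.toNat (List.replicate n.toNat 0)) 0 (n / 2) 1 = pvGrid n 1
      ∧ pvI n 1 = 0 ∧ pvJ n 1 = n / 2 := by
  have hI : pvI n 1 = 0 := by simp [pvI]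
  have hJ : pvJ n 1 = n / 2 := by
    have h0 : 0 ≤ n / 2 := by omega
    have h1 : n / 2 < n := by omega
    simp [pvJ]
    exact Int.emod_eq_of_lt h0 h1
  refine ⟨?_, hI, hJ⟩
  have hgs := pv_grid_set hn (v := 1) le_rfl (by nlinarith)
  rw [hI, hJ] at hgs
  rw [← pv_grid_zero hn]
  simpa using hgs

-- ===== VERDICT (by name: the statement is the Claim_ definition above) =====
theorem siamese_magic_square_spec : Claim_equal_siamese_magic_square := by
  intro n _ hpre
  unfold Spec_siamese_magic_square siamese_magic_square siamese_magic_square_alt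
  by_cases hm : PySem.Int.mod n 2 = 0
  · rw [if_pos hm, if_pos hm]
  · rw [if_neg hm, if_neg hm]
    have hn : 0 < n := by
      rcases hpre with h | h
      · exact absurd h hm
      · exact h
    have hodd : n % 2 = 1 := by
      rw [PySem.Int.mod_eq_emod_of_pos (by norm_num : (0:Int) < 2)] at hm
      omega
    have hp1 : (1:Int) ≤ n ^ 2 := by nlinarith
    have hfd : PySem.Int.floordiv n 2 = n / 2 := PySem.Int.floordiv_eq_ediv_of_pos (by norm_num)
    rw [hfd]
    obtain ⟨hinit, hI1, hJ1⟩ := pv_init hn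
    have hstate : ((pvCellSet (List.replicate n.toNat (List.replicate n.toNat 0)) 0 (n / 2) 1),
        (0:Int), n / 2, (2:Int)) = (pvGrid n 1, pvI n 1, pvJ n 1, 2) := by
      rw [hinit, hI1, hJ1]
    simp only [hstate]
    rw [PySem.List.pyRange_one, PySem.List.pyRange_one, List.foldl_map]
    simp only [sub_zero]
    have hfold := pv_fold_inv hn hodd (n ^ 2 - 1).toNat
      (by rw [Int.toNat_of_nonneg (by linarith)])
    rw [Int.toNat_of_nonneg (by linarith : (0:Int) ≤ n ^ 2 - 1)] at hfold
    rw [hfold, show n ^ 2 - 1 + 1 = n ^ 2 by ring]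
    simp only [List.map_map]
    congr 1
    unfold pvGrid
    apply List.map_congr_left
    intro a ha
    apply List.map_congr_left
    intro b hb
    have hub := (pvVal_bounds hn (a : Int) (b : Int)).2
    simp only [Function.comp, zero_add, PySem.Int.mod_eq_emod_of_pos hn, pvVal]
    rw [if_pos]
    exact hub
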